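-- pv_equiv track=rewrite | github.com/ketkat001/Programmers-coding | Level_4/호텔방배정.py | solution
-- ===== SOURCE A (Python) =====
-- def solution(k, room_number):
--     answer = []
--     room = {}
--     for number in room_number:
--         if number not in room:
--             room[number] = number + 1
--             answer.append(number)
--         else:
--             visit = [number]
--             while True:
--                 index = number
--                 number = room.get(number, 0)
--                 if not number:
--                     answer.append(index)
--                     room[index] = index + 1
--                     for num in visit:
--                         room[num] = index + 1
--                     break
--                 else:
--                     visit.append(number)
--     return answer
-- ===== SOURCE B (Python) =====
-- def solution(k, room_number):
--     answer = []
--     occupied = set()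
--     for number in room_number:
--         while number in occupied:
--             number += 1
--         answer.append(number)
--         occupied.add(number)
--     return answer
-- ===== Notes on version B (the rewrite author's own statement) =====
-- stated objective: simpler
-- what changed: Replaced A's path-compressing successor-dict walk (visit list + write-back of the free slot into every visited node) by a plain occupied-set with a linear upward scan to the next free room.
-- intended difference: On inputs whose requests saturate every room from some t <= -1 up to room -1 (some t <= -1 occurs in the list and at least 1-t of the requests lie in [t,-1]), A's truthiness test 'number = room.get(number, 0); if not number' misreads occupied room -1 (whose stored successor is -1+1 = 0) as free and hands it out again (e.g. A(3, [-1,-1]) = [-1,-1]); B returns the intended next genuinely free room ([-1, 0]). — e.g. on solution(3, [-1, -1]): A returns [-1, -1], B returns [-1, 0]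
import Mathlib
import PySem

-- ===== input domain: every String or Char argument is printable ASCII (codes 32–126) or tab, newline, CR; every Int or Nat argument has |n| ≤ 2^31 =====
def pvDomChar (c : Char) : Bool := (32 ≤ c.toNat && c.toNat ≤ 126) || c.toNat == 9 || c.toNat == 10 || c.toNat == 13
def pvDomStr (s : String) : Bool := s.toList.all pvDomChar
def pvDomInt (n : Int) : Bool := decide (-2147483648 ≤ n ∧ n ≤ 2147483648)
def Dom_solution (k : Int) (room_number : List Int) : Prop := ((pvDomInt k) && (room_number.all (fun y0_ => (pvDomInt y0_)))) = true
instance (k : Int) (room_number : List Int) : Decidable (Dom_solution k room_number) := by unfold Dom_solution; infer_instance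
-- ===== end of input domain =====

-- B replaces A's path-compressing successor-dict walk by a plain occupied-set with a linear
-- upward scan to the next free room (simpler, not faster); on the D_ inputs below A hands out
-- occupied room -1 again, B returns the intended next free room.

-- ===== PORT A =====
-- the inner 'while True' walk: reads room.get(number, 0), stops on a falsy (= 0) read.
-- fuel ≥ room.size + 1 always suffices (every stored successor is > its key, so the walk
-- visits distinct keys); the caller passes exactly that.
def walkA (room : PySem.Dict Int Int) : Nat → Int → List Int → Int × List Int
  | 0, number, visit => (number, visit)
  | fuel + 1, number, visit =>
    let index := number
    let number' := room.getD number 0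
    if number' = 0 then (index, visit)
    else walkA room fuel number' (visit ++ [number'])

def stepA (st : List Int × PySem.Dict Int Int) (number : Int) : List Int × PySem.Dict Int Int :=
  if st.2.contains number = false then
    (st.1 ++ [number], st.2.insert number (number + 1))
  else
    let r := walkA st.2 (st.2.size + 1) number [number]
    let index := r.1
    let visit := r.2
    let room1 := st.2.insert index (index + 1)
    let room2 := visit.foldl (fun d num => d.insert num (index + 1)) room1
    (st.1 ++ [index], room2)

def solution (k : Int) (room_number : List Int) : List Int :=
  (room_number.foldl stepA ([], PySem.Dict.empty)).1

-- ===== PORT B =====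
-- 'while number in occupied: number += 1' — fuel = len(occupied) + 1 always suffices
-- (the scan meets pairwise-distinct members of the set).
def scanB (occupied : PySem.Set Int) : Nat → Int → Int
  | 0, number => number
  | fuel + 1, number =>
    if PySem.Set.contains occupied number then scanB occupied fuel (number + 1) else number

def stepB (st : List Int × PySem.Set Int) (number : Int) : List Int × PySem.Set Int :=
  let n := scanB st.2 (st.2.length + 1) number
  (st.1 ++ [n], PySem.Set.add st.2 n)

def solution_alt (k : Int) (room_number : List Int) : List Int :=
  (room_number.foldl stepB (([], []) : List Int × PySem.Set Int)).1

-- ===== PRECONDITION & SPEC =====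
-- On inputs whose requests saturate every room from some t ≤ -1 up to room -1 (some t ≤ -1 occurs
-- in the list and at least 1-t of the requests lie in [t,-1]), A's truthiness test
-- 'number = room.get(number, 0); if not number' misreads occupied room -1 (stored successor
-- -1+1 = 0) as free and hands it out again (A (3, [-1,-1]) = [-1,-1]); B returns the intended
-- next genuinely free room ([-1,0]).
def D_solution (k : Int) (room_number : List Int) : Prop :=
  ∃ t ∈ room_number, t ≤ -1 ∧
    1 - t ≤ (room_number.countP (fun p => decide (t ≤ p ∧ p ≤ -1)) : Int)
instance (k : Int) (room_number : List Int) : Decidable (D_solution k room_number) := by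
  unfold D_solution; infer_instance

def Spec_solution (k : Int) (room_number : List Int) (out : List Int) : Prop :=
  ¬ D_solution k room_number → out = solution_alt k room_number
instance (k : Int) (room_number : List Int) (out : List Int) : Decidable (Spec_solution k room_number out) := by
  unfold Spec_solution; infer_instance

def pvDiffWitness_solution : Int × List Int := (3, [-1, -1])
def pvDiffWitnessOut_solution : (List Int) × (List Int) := ([-1, -1], [-1, 0])

-- ===== CLAIM (what is proved, stated in full; the proofs are below) =====
def Claim_unchanged_solution : Prop := ∀ (k : Int) (room_number : List Int), Dom_solution k room_number → Spec_solution k room_number (solution k room_number)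
def Claim_exact_solution : Prop := ∀ (k : Int) (room_number : List Int), Dom_solution k room_number → D_solution k room_number → solution k room_number ≠ solution_alt k room_number
def Claim_changed_solution : Prop := Dom_solution (pvDiffWitness_solution.1) (pvDiffWitness_solution.2) ∧ D_solution (pvDiffWitness_solution.1) (pvDiffWitness_solution.2) ∧ solution (pvDiffWitness_solution.1) (pvDiffWitness_solution.2) = pvDiffWitnessOut_solution.1 ∧ solution_alt (pvDiffWitness_solution.1) (pvDiffWitness_solution.2) = pvDiffWitnessOut_solution.2 ∧ pvDiffWitnessOut_solution.1 ≠ pvDiffWitnessOut_solution.2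

-- ===== LEMMAS AND PROOFS =====

-- the joint invariant: A's dict and B's occupied set describe the same occupied rooms, and
-- every stored successor skips only occupied rooms
def InvAB (room : PySem.Dict Int Int) (occ : List Int) : Prop :=
  room.keys.Nodup ∧ occ.Nodup ∧
  (∀ z : Int, room.contains z = true ↔ z ∈ occ) ∧
  (∀ x v : Int, room.get? x = some v →
    x < v ∧ ∀ y : Int, x ≤ y → y < v → y ∈ occ) ∧
  (∀ x v : Int, room.get? x = some v → x ≤ -1 → v ≤ 0)

-- counting invariant: a fully occupied run [t,y] with free left neighbour was filled by
-- requests inside [t,y], and its left end was itself requested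
def Cnt (pre occ : List Int) : Prop :=
  ∀ t y : Int, t ≤ y → (∀ r : Int, t ≤ r → r ≤ y → r ∈ occ) → (t - 1) ∉ occ →
    t ∈ pre ∧ y - t + 1 ≤ (pre.countP (fun p => decide (t ≤ p ∧ p ≤ y)) : Int)

lemma filter_len_lt {l : List Int} (hnd : l.Nodup) (p q : Int → Bool) (a : Int)
    (ha : a ∈ l) (hpa : p a = true) (hqa : q a = false)
    (himp : ∀ z, q z = true → p z = true) :
    (l.filter q).length < (l.filter p).length := by
  induction l with
  | nil => cases ha
  | cons b l ih =>
    have hb : b ∉ l := (List.nodup_cons.mp hnd).1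
    have hnd' : l.Nodup := (List.nodup_cons.mp hnd).2
    have hmono : (l.filter q).length ≤ (l.filter p).length := by
      rw [← List.countP_eq_length_filter, ← List.countP_eq_length_filter]
      exact List.countP_mono_left (fun z _ h => himp z h)
    rcases List.mem_cons.mp ha with rfl | hal
    · simp only [List.filter_cons, hqa, hpa]
      simp only [Bool.false_eq_true, if_false, if_true, List.length_cons]
      omega
    · have hlt := ih hnd' hal
      by_cases hq : q b = true
      · have hp := himp b hq
        simp only [List.filter_cons, hq, hp, if_true, List.length_cons]
        omega
      · simp only [Bool.not_eq_true] at hq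
        by_cases hp : p b = true
        · simp only [List.filter_cons, hq, hp, Bool.false_eq_true, if_false, if_true,
            List.length_cons]
          omega
        · simp only [Bool.not_eq_true] at hp
          simp only [List.filter_cons, hq, hp, Bool.false_eq_true, if_false]
          omega

lemma scan_spec (occ : List Int) (hnd : occ.Nodup) :
    ∀ (fuel : Nat) (n : Int),
      (occ.filter (fun y => decide (n ≤ y))).length < fuel →
      n ≤ scanB occ fuel n ∧ scanB occ fuel n ∉ occ ∧
        ∀ r : Int, n ≤ r → r < scanB occ fuel n → r ∈ occ := by
  intro fuel
  induction fuel with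
  | zero => intro n h; omega
  | succ f ih =>
    intro n hlen
    by_cases hc : PySem.Set.contains occ n = true
    · have hn : n ∈ occ := (PySem.Set.contains_iff occ n).mp hc
      have hdec : (occ.filter (fun y => decide (n + 1 ≤ y))).length < f := by
        have := filter_len_lt hnd (fun y => decide (n ≤ y)) (fun y => decide (n + 1 ≤ y)) n hn
          (by simp) (by simp) (fun z h => by simp at h ⊢; omega)
        omega
      obtain ⟨h1, h2, h3⟩ := ih (n + 1) hdec
      have hun : scanB occ (f + 1) n = scanB occ f (n + 1) := by
        simp only [scanB, hc, if_true]
      rw [hun]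
      refine ⟨by omega, h2, fun r hr hrs => ?_⟩
      by_cases hrn : r = n
      · rwa [hrn]
      · exact h3 r (by omega) hrs
    · have hn : n ∉ occ := fun hm => hc ((PySem.Set.contains_iff occ n).mpr hm)
      have hcf : PySem.Set.contains occ n = false := by
        cases h : PySem.Set.contains occ n
        · rfl
        · exact absurd h hc
      have hun : scanB occ (f + 1) n = n := by
        simp only [scanB, hcf, Bool.false_eq_true, if_false]
      rw [hun]
      exact ⟨le_refl n, hn, fun r hr hrs => absurd hrs (by omega)⟩

lemma firstfree_unique {occ : List Int} {x e e' : Int}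
    (h1 : x ≤ e) (h2 : e ∉ occ) (h3 : ∀ r : Int, x ≤ r → r < e → r ∈ occ)
    (h4 : x ≤ e') (h5 : e' ∉ occ) (h6 : ∀ r : Int, x ≤ r → r < e' → r ∈ occ) :
    e = e' := by
  rcases lt_trichotomy e e' with h | h | h
  · exact absurd (h6 e h1 h) h2
  · exact h
  · exact absurd (h3 e' h4 h) h5

lemma runstart (occ : List Int) (hnd : occ.Nodup) (y : Int) :
    ∀ (m : Nat) (x : Int), (occ.filter (fun r => decide (r < x))).length ≤ m → x ≤ y →
      (∀ r : Int, x ≤ r → r ≤ y → r ∈ occ) →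
      ∃ t : Int, t ≤ x ∧ (t - 1) ∉ occ ∧ ∀ r : Int, t ≤ r → r ≤ y → r ∈ occ := by
  intro m
  induction m with
  | zero =>
    intro x hm hxy hblock
    by_cases h : (x - 1) ∈ occ
    · exfalso
      have hmem : (x - 1) ∈ occ.filter (fun r => decide (r < x)) :=
        List.mem_filter.mpr ⟨h, by simp only [decide_eq_true_eq]; omega⟩
      have := List.length_pos_of_mem hmem
      omega
    · exact ⟨x, le_refl x, h, hblock⟩
  | succ m ih =>
    intro x hm hxy hblock
    by_cases h : (x - 1) ∈ occ
    · have hblock' : ∀ r : Int, x - 1 ≤ r → r ≤ y → r ∈ occ := by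
        intro r h1 h2
        by_cases hr : x ≤ r
        · exact hblock r hr h2
        · have : r = x - 1 := by omega
          rwa [this]
      have hm' : (occ.filter (fun r => decide (r < x - 1))).length ≤ m := by
        have := filter_len_lt hnd (fun r => decide (r < x)) (fun r => decide (r < x - 1))
          (x - 1) h (by simp) (by simp) (fun z hz => by simp at hz ⊢; omega)
        omega
      obtain ⟨t, ht1, ht2, ht3⟩ := ih (x - 1) hm' (by omega) hblock'
      exact ⟨t, by omega, ht2, ht3⟩
    · exact ⟨x, le_refl x, h, hblock⟩

lemma get?_foldl_insert_const (l : List Int) (d : PySem.Dict Int Int) (c z : Int) :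
    (l.foldl (fun r num => r.insert num c) d).get? z =
      if z ∈ l then some c else d.get? z := by
  induction l generalizing d with
  | nil => simp
  | cons a l ih =>
    simp only [List.foldl_cons]
    rw [ih]
    by_cases hz : z ∈ l
    · simp [hz]
    · rw [PySem.Dict.get?_insert]
      by_cases hza : z = a <;> simp [hza, hz]

lemma walkA_eq (room : PySem.Dict Int Int) (occ : List Int) (hInv : InvAB room occ) :
    ∀ (fuel : Nat) (cur : Int) (visit : List Int),
      (occ.filter (fun y => decide (cur ≤ y))).length < fuel →
      ¬ (cur ≤ -1 ∧ ∀ r : Int, cur ≤ r → r ≤ -1 → r ∈ occ) →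
      ∃ e vis', walkA room fuel cur visit = (e, vis') ∧
        cur ≤ e ∧ e ∉ occ ∧ (∀ r : Int, cur ≤ r → r < e → r ∈ occ) ∧
        (∀ num, num ∈ vis' → num ∈ visit ∨ (cur < num ∧ num ≤ e)) := by
  obtain ⟨hkeysnd, hoccnd, hmem, hval, hneg⟩ := hInv
  intro fuel
  induction fuel with
  | zero => intro cur visit h; omega
  | succ f ih =>
    intro cur visit hlen hsafe
    by_cases hv : room.getD cur 0 = 0
    · cases hg : room.get? cur with
      | none =>
        have hcur : cur ∉ occ := by
          intro hcc
          have hct := (hmem cur).mpr hcc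
          rw [PySem.Dict.contains_eq_isSome_get?, hg] at hct
          simp at hct
        refine ⟨cur, visit, ?_, le_refl _, hcur, fun r h1 h2 => absurd h2 (by omega),
          fun num h => Or.inl h⟩
        simp [walkA, hv]
      | some w =>
        exfalso
        have hw : w = 0 := by
          rw [PySem.Dict.getD_eq_get?_getD, hg] at hv
          simpa using hv
        subst hw
        obtain ⟨hlt, hintv⟩ := hval cur 0 hg
        exact hsafe ⟨by omega, fun r h1 h2 => hintv r h1 (by omega)⟩
    · have hg : room.get? cur = some (room.getD cur 0) := by
        cases hg : room.get? cur with
        | none =>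
          exfalso
          rw [PySem.Dict.getD_eq_get?_getD, hg] at hv
          simp at hv
        | some w => rw [PySem.Dict.getD_eq_get?_getD, hg]; simp
      have hstep : walkA room (f + 1) cur visit =
          walkA room f (room.getD cur 0) (visit ++ [room.getD cur 0]) := by
        simp only [walkA]
        rw [if_neg hv]
      set v := room.getD cur 0 with hvdef
      obtain ⟨hlt, hintv⟩ := hval cur v hg
      have hcur : cur ∈ occ := hintv cur (le_refl _) hlt
      have hfuel : (occ.filter (fun y => decide (v ≤ y))).length < f := by
        have := filter_len_lt hoccnd (fun y => decide (cur ≤ y)) (fun y => decide (v ≤ y))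
          cur hcur (by simp) (by simp; omega) (fun z h => by simp at h ⊢; omega)
        omega
      have hsafe' : ¬ (v ≤ -1 ∧ ∀ r : Int, v ≤ r → r ≤ -1 → r ∈ occ) := by
        rintro ⟨h1, h2⟩
        exact hsafe ⟨by omega, fun r hr1 hr2 => by
          by_cases hrv : v ≤ r
          · exact h2 r hrv hr2
          · exact hintv r hr1 (by omega)⟩
      obtain ⟨e, vis', heq, hle, henot, hint, hvis⟩ := ih v (visit ++ [v]) hfuel hsafe'
      refine ⟨e, vis', ?_, by omega, henot, ?_, ?_⟩
      · rw [hstep]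
        exact heq
      · intro r h1 h2
        by_cases hrv : v ≤ r
        · exact hint r hrv h2
        · exact hintv r h1 (by omega)
      · intro num hn
        rcases hvis num hn with h | h
        · rcases List.mem_append.mp h with h | h
          · exact Or.inl h
          · simp at h
            subst h
            exact Or.inr ⟨hlt, hle⟩
        · exact Or.inr ⟨by omega, h.2⟩

lemma countP_split (l : List Int) (t e y : Int) (hte : t ≤ e) (hey : e ≤ y) :
    l.countP (fun p => decide (t ≤ p ∧ p ≤ e - 1)) +
      l.countP (fun p => decide (e + 1 ≤ p ∧ p ≤ y)) ≤
      l.countP (fun p => decide (t ≤ p ∧ p ≤ y)) := by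
  induction l with
  | nil => simp
  | cons a l ih =>
    simp only [List.countP_cons]
    have hadd : (if decide (t ≤ a ∧ a ≤ e - 1) = true then 1 else 0) +
        (if decide (e + 1 ≤ a ∧ a ≤ y) = true then 1 else 0) ≤
        (if decide (t ≤ a ∧ a ≤ y) = true then (1 : Nat) else 0) := by
      simp only [decide_eq_true_eq]
      split_ifs <;> omega
    omega

lemma cnt_step (pre occ : List Int) (x e : Int) (hc : Cnt pre occ)
    (hxe : x ≤ e) (he : e ∉ occ) (hint : ∀ r : Int, x ≤ r → r < e → r ∈ occ) :
    Cnt (pre ++ [x]) (PySem.Set.add occ e) := by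
  intro t y hty hblock hleft
  have hmemadd : ∀ z : Int, z ∈ PySem.Set.add occ e ↔ z ∈ occ ∨ z = e :=
    fun z => PySem.Set.mem_add occ e z
  have hleft' : (t - 1) ∉ occ := fun h => hleft ((hmemadd (t - 1)).mpr (Or.inl h))
  have hcount : ∀ (a b : Int), (pre.countP (fun p => decide (a ≤ p ∧ p ≤ b)) : Int) ≤
      ((pre ++ [x]).countP (fun p => decide (a ≤ p ∧ p ≤ b)) : Int) := by
    intro a b
    rw [List.countP_append]
    push_cast
    omega
  by_cases hin : t ≤ e ∧ e ≤ y
  · -- e lies inside the run: split it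
    have hxt : t ≤ x := by
      by_contra hxt
      push_neg at hxt
      have h1 : x ≤ t - 1 := by omega
      have h2 : t - 1 < e := by omega
      exact hleft' (hint (t - 1) h1 h2)
    have hxy : x ≤ y := by omega
    have hxcount : ((pre ++ [x]).countP (fun p => decide (t ≤ p ∧ p ≤ y)) : Int) =
        (pre.countP (fun p => decide (t ≤ p ∧ p ≤ y)) : Int) + 1 := by
      rw [List.countP_append]
      have : ([x].countP (fun p => decide (t ≤ p ∧ p ≤ y))) = 1 := by
        simp [List.countP_cons, hxt, hxy]
      rw [this]
      push_cast
      ring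
    have hc1 : t < e → t ∈ pre ∧
        (e - 1) - t + 1 ≤ (pre.countP (fun p => decide (t ≤ p ∧ p ≤ e - 1)) : Int) := by
      intro hlt
      refine hc t (e - 1) (by omega) (fun r h1 h2 => ?_) hleft'
      have hr : r ∈ PySem.Set.add occ e := hblock r h1 (by omega)
      rcases (hmemadd r).mp hr with h | h
      · exact h
      · omega
    have hc2 : e < y → (y - (e + 1) + 1 : Int) ≤
        (pre.countP (fun p => decide (e + 1 ≤ p ∧ p ≤ y)) : Int) := by
      intro hlt
      refine (hc (e + 1) y (by omega) (fun r h1 h2 => ?_) (by simpa using he)).2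
      have hr : r ∈ PySem.Set.add occ e := hblock r (by omega) h2
      rcases (hmemadd r).mp hr with h | h
      · exact h
      · omega
    have hsplit := countP_split pre t e y hin.1 hin.2
    have htpre : t ∈ pre ++ [x] := by
      by_cases hlt : t < e
      · exact List.mem_append.mpr (Or.inl (hc1 hlt).1)
      · have : t = e := by omega
        have : t = x := by
          -- t = e and t ≤ x ≤ e
          omega
        subst this
        exact List.mem_append.mpr (Or.inr (by simp))
    refine ⟨htpre, ?_⟩
    rw [hxcount]
    by_cases hlt : t < e
    · by_cases hlt2 : e < y
      · have h1 := (hc1 hlt).2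
        have h2 := hc2 hlt2
        have : ((pre.countP (fun p => decide (t ≤ p ∧ p ≤ e - 1)) : Int) +
            (pre.countP (fun p => decide (e + 1 ≤ p ∧ p ≤ y)) : Int)) ≤
            (pre.countP (fun p => decide (t ≤ p ∧ p ≤ y)) : Int) := by
          push_cast at hsplit ⊢
          omega
        omega
      · -- e = y
        have hey' : e = y := by omega
        have h1 := (hc1 hlt).2
        have hmono : (pre.countP (fun p => decide (t ≤ p ∧ p ≤ e - 1)) : Int) ≤
            (pre.countP (fun p => decide (t ≤ p ∧ p ≤ y)) : Int) := by
          have := List.countP_mono_left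
            (l := pre) (p := fun p => decide (t ≤ p ∧ p ≤ e - 1))
            (q := fun p => decide (t ≤ p ∧ p ≤ y))
            (fun z _ h => by simp at h ⊢; omega)
          exact_mod_cast this
        omega
    · -- t = e
      have hte' : t = e := by omega
      by_cases hlt2 : e < y
      · have h2 := hc2 hlt2
        have hmono : (pre.countP (fun p => decide (e + 1 ≤ p ∧ p ≤ y)) : Int) ≤
            (pre.countP (fun p => decide (t ≤ p ∧ p ≤ y)) : Int) := by
          have := List.countP_mono_left
            (l := pre) (p := fun p => decide (e + 1 ≤ p ∧ p ≤ y))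
            (q := fun p => decide (t ≤ p ∧ p ≤ y))
            (fun z _ h => by simp at h ⊢; omega)
          exact_mod_cast this
        omega
      · have : t = y := by omega
        have hcnt0 : (0 : Int) ≤ (pre.countP (fun p => decide (t ≤ p ∧ p ≤ y)) : Int) := by
          positivity
        omega
  · -- e outside [t,y]: the run was already there
    have hblock' : ∀ r : Int, t ≤ r → r ≤ y → r ∈ occ := by
      intro r h1 h2
      rcases (hmemadd r).mp (hblock r h1 h2) with h | h
      · exact h
      · exfalso; apply hin; omega
    obtain ⟨h1, h2⟩ := hc t y hty hblock' hleft'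
    exact ⟨List.mem_append.mpr (Or.inl h1), le_trans h2 (hcount t y)⟩

lemma inv_step_new (room : PySem.Dict Int Int) (occ : List Int) (hInv : InvAB room occ)
    (x : Int) (hx : x ∉ occ) :
    InvAB (room.insert x (x + 1)) (PySem.Set.add occ x) := by
  obtain ⟨hkeysnd, hoccnd, hmem, hval, hneg⟩ := hInv
  refine ⟨PySem.Dict.nodup_keys_insert room x (x + 1) hkeysnd,
    PySem.Set.nodup_add occ x hoccnd, ?_, ?_, ?_⟩
  · intro z
    rw [PySem.Dict.contains_insert, PySem.Set.mem_add]
    constructor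
    · intro h
      rcases Bool.or_eq_true_iff.mp h with h | h
      · exact Or.inr (by simpa using h)
      · exact Or.inl ((hmem z).mp h)
    · intro h
      rcases h with h | h
      · exact Bool.or_eq_true_iff.mpr (Or.inr ((hmem z).mpr h))
      · exact Bool.or_eq_true_iff.mpr (Or.inl (by simpa using h))
  · intro a v hg
    rw [PySem.Dict.get?_insert] at hg
    by_cases ha : a = x
    · subst ha
      rw [if_pos rfl] at hg
      obtain rfl : a + 1 = v := by simpa using hg
      refine ⟨by omega, fun y h1 h2 => ?_⟩
      have : y = a := by omega
      rw [this, PySem.Set.mem_add]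
      exact Or.inr rfl
    · rw [if_neg ha] at hg
      obtain ⟨h1, h2⟩ := hval a v hg
      exact ⟨h1, fun y hy1 hy2 => (PySem.Set.mem_add occ x y).mpr (Or.inl (h2 y hy1 hy2))⟩
  · intro a v hg ha
    rw [PySem.Dict.get?_insert] at hg
    by_cases hax : a = x
    · subst hax
      obtain rfl : a + 1 = v := by rw [if_pos rfl] at hg; simpa using hg
      omega
    · rw [if_neg hax] at hg
      exact hneg a v hg ha

lemma inv_step_walk (room : PySem.Dict Int Int) (occ : List Int) (hInv : InvAB room occ)
    (x e : Int) (visit : List Int) (hx : x ∈ occ)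
    (hxe : x ≤ e) (he : e ∉ occ) (hint : ∀ r : Int, x ≤ r → r < e → r ∈ occ)
    (hvis : ∀ num, num ∈ visit → num = x ∨ (x < num ∧ num ≤ e))
    (hneg2 : x ≤ -1 → e ≤ -1) :
    InvAB (visit.foldl (fun d num => d.insert num (e + 1)) (room.insert e (e + 1)))
      (PySem.Set.add occ e) := by
  obtain ⟨hkeysnd, hoccnd, hmem, hval, hneg⟩ := hInv
  have hvisocc : ∀ num, num ∈ visit → num ∈ occ ∨ num = e := by
    intro num h
    rcases hvis num h with h | ⟨h1, h2⟩
    · subst h; exact Or.inl hx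
    · by_cases hne : num = e
      · exact Or.inr hne
      · exact Or.inl (hint num (by omega) (by omega))
  have hget : ∀ z : Int,
      (visit.foldl (fun d num => d.insert num (e + 1)) (room.insert e (e + 1))).get? z =
        if z ∈ visit then some (e + 1) else (room.insert e (e + 1)).get? z :=
    fun z => get?_foldl_insert_const visit (room.insert e (e + 1)) (e + 1) z
  refine ⟨?_, PySem.Set.nodup_add occ e hoccnd, ?_, ?_, ?_⟩
  · exact PySem.Dict.nodup_keys_foldl_insert visit (fun _ _ => e + 1)
      (room.insert e (e + 1)) (PySem.Dict.nodup_keys_insert room e (e + 1) hkeysnd)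
  · intro z
    rw [PySem.Dict.contains_eq_isSome_get?, hget z, PySem.Set.mem_add]
    by_cases hz : z ∈ visit
    · simp only [hz, if_true, Option.isSome_some]
      rcases hvisocc z hz with h | h
      · simp [h]
      · simp [h]
    · simp only [hz, if_false]
      rw [PySem.Dict.get?_insert]
      by_cases hze : z = e
      · simp [hze]
      · simp only [hze, if_false]
        rw [← PySem.Dict.contains_eq_isSome_get?]
        constructor
        · intro h; exact Or.inl ((hmem z).mp h)
        · intro h
          rcases h with h | h
          · exact (hmem z).mpr h
          · exact h.elim
  · intro a v hg
    rw [hget a] at hg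
    have hnewval : ∀ b : Int, b ≤ e → x ≤ b →
        b < e + 1 ∧ ∀ y : Int, b ≤ y → y < e + 1 → y ∈ PySem.Set.add occ e := by
      intro b hbe hxb
      refine ⟨by omega, fun y h1 h2 => ?_⟩
      rw [PySem.Set.mem_add]
      by_cases hy : y = e
      · exact Or.inr hy
      · exact Or.inl (hint y (by omega) (by omega))
    by_cases ha : a ∈ visit
    · rw [if_pos ha] at hg
      obtain rfl : e + 1 = v := by simpa using hg
      rcases hvis a ha with h | ⟨h1, h2⟩
      · subst h; exact hnewval a hxe (le_refl a)
      · exact hnewval a h2 (by omega)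
    · rw [if_neg ha, PySem.Dict.get?_insert] at hg
      by_cases hae : a = e
      · subst hae
        rw [if_pos rfl] at hg
        obtain rfl : a + 1 = v := by simpa using hg
        refine ⟨by omega, fun y h1 h2 => ?_⟩
        have : y = a := by omega
        rw [this, PySem.Set.mem_add]
        exact Or.inr rfl
      · rw [if_neg hae] at hg
        obtain ⟨h1, h2⟩ := hval a v hg
        exact ⟨h1, fun y hy1 hy2 => (PySem.Set.mem_add occ e y).mpr (Or.inl (h2 y hy1 hy2))⟩
  · intro a v hg ha
    rw [hget a] at hg
    have hwr : x ≤ a → v = e + 1 → v ≤ 0 := by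
      intro h1 h2
      have := hneg2 (by omega)
      omega
    by_cases hav : a ∈ visit
    · rw [if_pos hav] at hg
      obtain rfl : e + 1 = v := by simpa using hg
      rcases hvis a hav with h | ⟨h1, h2⟩
      · exact hwr (le_of_eq h.symm) rfl
      · exact hwr (by omega) rfl
    · rw [if_neg hav, PySem.Dict.get?_insert] at hg
      by_cases hae : a = e
      · subst hae
        obtain rfl : a + 1 = v := by rw [if_pos rfl] at hg; simpa using hg
        omega
      · rw [if_neg hae] at hg
        exact hneg a v hg ha

lemma occ_len_eq (room : PySem.Dict Int Int) (occ : List Int) (hInv : InvAB room occ) :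
    occ.length = room.size := by
  obtain ⟨hkeysnd, hoccnd, hmem, _, _⟩ := hInv
  have hperm : occ.Perm room.keys := by
    rw [List.perm_ext_iff_of_nodup hoccnd hkeysnd]
    intro z
    rw [← PySem.Dict.contains_iff_mem_keys, hmem z]
  have h1 : occ.length = room.keys.length := hperm.length_eq
  rw [h1]
  simp [PySem.Dict.keys, PySem.Dict.size]

lemma stepA_eq (room : PySem.Dict Int Int) (occ : List Int) (ans : List Int)
    (hInv : InvAB room occ) (x : Int)
    (hsafe : ¬ (x ≤ -1 ∧ ∀ r : Int, x ≤ r → r ≤ -1 → r ∈ occ)) :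
    (stepA (ans, room) x).1 = ans ++ [scanB occ (occ.length + 1) x] ∧
      InvAB (stepA (ans, room) x).2 (PySem.Set.add occ (scanB occ (occ.length + 1) x)) := by
  obtain ⟨hkeysnd, hoccnd, hmem, hval, hneg⟩ := hInv
  set e := scanB occ (occ.length + 1) x with hedef
  have hlenle : (occ.filter (fun y => decide (x ≤ y))).length < occ.length + 1 :=
    Nat.lt_succ_of_le (List.length_filter_le _ occ)
  obtain ⟨hE1, hE2, hE3⟩ := scan_spec occ hoccnd (occ.length + 1) x hlenle
  by_cases hc : room.contains x = true
  · -- occupied: A walks the chain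
    have hxocc : x ∈ occ := (hmem x).mp hc
    have hfuel : (occ.filter (fun y => decide (x ≤ y))).length < room.size + 1 := by
      have := occ_len_eq room occ ⟨hkeysnd, hoccnd, hmem, hval, hneg⟩
      have := List.length_filter_le (fun y => decide (x ≤ y)) occ
      omega
    obtain ⟨e0, vis', heq, h1, h2, h3, h4⟩ :=
      walkA_eq room occ ⟨hkeysnd, hoccnd, hmem, hval, hneg⟩ (room.size + 1) x [x] hfuel hsafe
    have hee : e0 = e := firstfree_unique h1 h2 h3 hE1 hE2 hE3
    have hstep : stepA (ans, room) x =
        (ans ++ [e0], vis'.foldl (fun d num => d.insert num (e0 + 1))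
          (room.insert e0 (e0 + 1))) := by
      simp only [stepA, hc]
      simp [heq]
    rw [hstep, ← hee]
    refine ⟨rfl, ?_⟩
    refine inv_step_walk room occ ⟨hkeysnd, hoccnd, hmem, hval, hneg⟩ x e0 vis' hxocc h1 h2 h3
      ?_ ?_
    · intro num hn
      rcases h4 num hn with h | h
      · simp at h; exact Or.inl h
      · exact Or.inr h
    · intro hx1
      by_contra hbig
      push_neg at hbig
      exact hsafe ⟨hx1, fun r hr1 hr2 => h3 r hr1 (by omega)⟩
  · -- free: A takes the room directly
    have hcf : room.contains x = false := by
      cases h : room.contains x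
      · rfl
      · exact absurd h hc
    have hxocc : x ∉ occ := fun h => hc ((hmem x).mpr h)
    have hex : e = x :=
      (firstfree_unique (le_refl x) hxocc (fun r hr1 hr2 => absurd hr2 (by omega))
        hE1 hE2 hE3).symm
    have hstep : stepA (ans, room) x = (ans ++ [x], room.insert x (x + 1)) := by
      simp [stepA, hcf]
    rw [hstep, hex]
    exact ⟨rfl, inv_step_new room occ ⟨hkeysnd, hoccnd, hmem, hval, hneg⟩ x hxocc⟩

lemma loop_eq : ∀ (rest pre : List Int) (ans : List Int)
    (room : PySem.Dict Int Int) (occ : List Int),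
    InvAB room occ → Cnt pre occ →
    ¬ (∃ t ∈ pre ++ rest, t ≤ -1 ∧
        1 - t ≤ ((pre ++ rest).countP (fun p => decide (t ≤ p ∧ p ≤ -1)) : Int)) →
    (rest.foldl stepA (ans, room)).1 = (rest.foldl stepB (ans, occ)).1 := by
  intro rest
  induction rest with
  | nil => intro pre ans room occ _ _ _; rfl
  | cons x rest ih =>
    intro pre ans room occ hInv hCnt hNo
    have hoccnd : occ.Nodup := hInv.2.1
    -- no trigger at this step
    have hsafe : ¬ (x ≤ -1 ∧ ∀ r : Int, x ≤ r → r ≤ -1 → r ∈ occ) := by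
      rintro ⟨hx1, hblock⟩
      obtain ⟨t, ht1, ht2, ht3⟩ := runstart occ hoccnd (-1)
        ((occ.filter (fun r => decide (r < x))).length) x (le_refl _) hx1 hblock
      obtain ⟨htpre, htcnt⟩ := hCnt t (-1) (by omega) ht3 ht2
      apply hNo
      refine ⟨t, List.mem_append.mpr (Or.inl htpre), by omega, ?_⟩
      have h1 : 0 < ((x :: rest).countP (fun p => decide (t ≤ p ∧ p ≤ -1))) := by
        rw [List.countP_pos_iff]
        exact ⟨x, List.mem_cons_self, by simp only [decide_eq_true_eq]; omega⟩
      rw [List.countP_append]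
      push_cast
      omega
    set e := scanB occ (occ.length + 1) x with hedef
    have hlenle : (occ.filter (fun y => decide (x ≤ y))).length < occ.length + 1 :=
      Nat.lt_succ_of_le (List.length_filter_le _ occ)
    obtain ⟨hE1, hE2, hE3⟩ := scan_spec occ hoccnd (occ.length + 1) x hlenle
    obtain ⟨hAans, hAinv⟩ := stepA_eq room occ ans hInv x hsafe
    have hBstep : stepB (ans, occ) x = (ans ++ [e], PySem.Set.add occ e) := rfl
    have hcnt' : Cnt (pre ++ [x]) (PySem.Set.add occ e) :=
      cnt_step pre occ x e hCnt hE1 hE2 hE3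
    have hNo' : ¬ (∃ t ∈ (pre ++ [x]) ++ rest, t ≤ -1 ∧
        1 - t ≤ (((pre ++ [x]) ++ rest).countP (fun p => decide (t ≤ p ∧ p ≤ -1)) : Int)) := by
      rw [List.append_assoc]
      simpa using hNo
    have hA : (x :: rest).foldl stepA (ans, room) =
        rest.foldl stepA (stepA (ans, room) x) := rfl
    have hB : (x :: rest).foldl stepB (ans, occ) =
        rest.foldl stepB (stepB (ans, occ) x) := rfl
    have hsplit : stepA (ans, room) x = (ans ++ [e], (stepA (ans, room) x).2) := by
      rw [← hAans]
    rw [hA, hB, hBstep, hsplit]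
    exact ih (pre ++ [x]) (ans ++ [e]) (stepA (ans, room) x).2 (PySem.Set.add occ e)
      hAinv hcnt' hNo'

lemma invab_empty : InvAB PySem.Dict.empty [] := by
  refine ⟨by simp [PySem.Dict.keys_empty], List.nodup_nil, ?_, ?_, ?_⟩
  · intro z; simp [PySem.Dict.contains_empty]
  · intro a v hg; rw [PySem.Dict.get?_empty] at hg; cases hg
  · intro a v hg; rw [PySem.Dict.get?_empty] at hg; cases hg

-- at a trigger the walk never leaves the negative rooms (stored successors there are ≤ 0)
lemma walkA_le (room : PySem.Dict Int Int)
    (hneg : ∀ x v : Int, room.get? x = some v → x ≤ -1 → v ≤ 0) :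
    ∀ (fuel : Nat) (cur : Int) (visit : List Int), cur ≤ -1 →
      (walkA room fuel cur visit).1 ≤ -1 := by
  intro fuel
  induction fuel with
  | zero => intro cur visit hcur; exact hcur
  | succ f ih =>
    intro cur visit hcur
    by_cases hv : room.getD cur 0 = 0
    · have hstop : walkA room (f + 1) cur visit = (cur, visit) := by
        simp only [walkA]
        rw [if_pos hv]
      rw [hstop]
      exact hcur
    · have hstep : walkA room (f + 1) cur visit =
          walkA room f (room.getD cur 0) (visit ++ [room.getD cur 0]) := by
        simp only [walkA]
        rw [if_neg hv]
      have hg : room.get? cur = some (room.getD cur 0) := by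
        cases hg : room.get? cur with
        | none =>
          exfalso
          rw [PySem.Dict.getD_eq_get?_getD, hg] at hv
          simp at hv
        | some w => rw [PySem.Dict.getD_eq_get?_getD, hg]; simp
      have hle := hneg cur (room.getD cur 0) hg hcur
      rw [hstep]
      exact ih (room.getD cur 0) (visit ++ [room.getD cur 0]) (by omega)

lemma filter_interval_le (occ : List Int) (hnd : occ.Nodup) (t : Int) (ht : t ≤ -1) :
    ((occ.filter (fun z => decide (t ≤ z ∧ z ≤ -1))).length : Int) ≤ -t := by
  set l := occ.filter (fun z => decide (t ≤ z ∧ z ≤ -1)) with hl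
  have hlnd : l.Nodup := hnd.filter _
  have hsub : l.toFinset ⊆ Finset.Icc t (-1) := by
    intro z hz
    rw [List.mem_toFinset] at hz
    have hmem := List.of_mem_filter hz
    simp only [decide_eq_true_eq] at hmem
    exact Finset.mem_Icc.mpr hmem
  have hcard : l.toFinset.card = l.length := List.toFinset_card_of_nodup hlnd
  have hle := Finset.card_le_card hsub
  rw [hcard, Int.card_Icc] at hle
  have h2 : ((-1 : Int) + 1 - t).toNat = (-t).toNat := by norm_num
  rw [h2] at hle
  omega

lemma stepA_fst (st : List Int × PySem.Dict Int Int) (x : Int) :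
    ∃ w : Int, (stepA st x).1 = st.1 ++ [w] := by
  obtain ⟨ans, room⟩ := st
  by_cases hc : room.contains x = false
  · exact ⟨x, by simp [stepA, hc]⟩
  · exact ⟨(walkA room (room.size + 1) x [x]).1,
      by simp only [stepA, hc, Bool.true_eq_false, if_false]⟩

lemma foldl_stepA_prefix : ∀ (rest : List Int) (st : List Int × PySem.Dict Int Int),
    ∃ tail, (rest.foldl stepA st).1 = st.1 ++ tail := by
  intro rest
  induction rest with
  | nil => intro st; exact ⟨[], (List.append_nil _).symm⟩
  | cons x rest ih =>
    intro st
    obtain ⟨w, hw⟩ := stepA_fst st x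
    obtain ⟨tail, htail⟩ := ih (stepA st x)
    refine ⟨[w] ++ tail, ?_⟩
    rw [List.foldl_cons, htail, hw]
    simp

lemma foldl_stepB_prefix : ∀ (rest : List Int) (st : List Int × PySem.Set Int),
    ∃ tail, (rest.foldl stepB st).1 = st.1 ++ tail := by
  intro rest
  induction rest with
  | nil => intro st; exact ⟨[], (List.append_nil _).symm⟩
  | cons x rest ih =>
    intro st
    obtain ⟨tail, htail⟩ := ih (stepB st x)
    refine ⟨[scanB st.2 (st.2.length + 1) x] ++ tail, ?_⟩
    rw [List.foldl_cons, htail]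
    simp [stepB]

-- pigeonhole: inside D_ the runs must at some step find every room of [x,-1] occupied,
-- and there A hands out a room ≤ -1 while B moves on to a room ≥ 0
lemma tight_main : ∀ (rest ans : List Int) (room : PySem.Dict Int Int) (occ : List Int)
    (t : Int), InvAB room occ → t ≤ -1 →
    (1 - t : Int) ≤ (rest.countP (fun p => decide (t ≤ p ∧ p ≤ -1)) : Int) +
      ((occ.filter (fun z => decide (t ≤ z ∧ z ≤ -1))).length : Int) →
    (rest.foldl stepA (ans, room)).1 ≠ (rest.foldl stepB (ans, occ)).1 := by
  intro rest
  induction rest with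
  | nil =>
    intro ans room occ t hInv ht hcnt
    exfalso
    have := filter_interval_le occ hInv.2.1 t ht
    simp only [List.countP_nil] at hcnt
    omega
  | cons x rest ih =>
    intro ans room occ t hInv ht hcnt
    obtain ⟨hkeysnd, hoccnd, hmem, hval, hneg⟩ := hInv
    set e := scanB occ (occ.length + 1) x with hedef
    have hlenle : (occ.filter (fun y => decide (x ≤ y))).length < occ.length + 1 :=
      Nat.lt_succ_of_le (List.length_filter_le _ occ)
    obtain ⟨hE1, hE2, hE3⟩ := scan_spec occ hoccnd (occ.length + 1) x hlenle
    by_cases htrig : x ≤ -1 ∧ ∀ r : Int, x ≤ r → r ≤ -1 → r ∈ occ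
    · -- the trigger step: A appends a room ≤ -1, B appends a room ≥ 0
      have hxocc : x ∈ occ := htrig.2 x (le_refl x) htrig.1
      have hc : room.contains x = true := (hmem x).mpr hxocc
      have he0 : 0 ≤ e := by
        by_contra hbig
        push_neg at hbig
        exact hE2 (htrig.2 e hE1 (by omega))
      set a := (walkA room (room.size + 1) x [x]).1 with hadef
      have ha : a ≤ -1 := walkA_le room hneg (room.size + 1) x [x] htrig.1
      have hstepa : stepA (ans, room) x =
          (ans ++ [a], (stepA (ans, room) x).2) := by
        simp only [stepA, hc, Bool.true_eq_false, if_false]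
        rw [hadef]
      have hstepb : stepB (ans, occ) x = (ans ++ [e], PySem.Set.add occ e) := rfl
      rw [List.foldl_cons, List.foldl_cons, hstepa, hstepb]
      obtain ⟨tailA, hA⟩ := foldl_stepA_prefix rest (ans ++ [a], (stepA (ans, room) x).2)
      obtain ⟨tailB, hB⟩ := foldl_stepB_prefix rest (ans ++ [e], PySem.Set.add occ e)
      rw [hA, hB]
      intro hcontra
      have h1 : a :: tailA = e :: tailB := by
        have h2 := congrArg (fun l => List.drop ans.length l) hcontra
        simpa using h2
      have : a = e := ((List.cons.injEq _ _ _ _).mp h1).1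
      omega
    · -- no trigger here: both sides append the same room, the deficit survives
      have hsafe : ¬ (x ≤ -1 ∧ ∀ r : Int, x ≤ r → r ≤ -1 → r ∈ occ) := htrig
      obtain ⟨hAans, hAinv⟩ := stepA_eq room occ ans ⟨hkeysnd, hoccnd, hmem, hval, hneg⟩ x hsafe
      have hstepb : stepB (ans, occ) x = (ans ++ [e], PySem.Set.add occ e) := rfl
      have hsplit : stepA (ans, room) x = (ans ++ [e], (stepA (ans, room) x).2) := by
        rw [← hAans]
      have hcnt' : (1 - t : Int) ≤
          (rest.countP (fun p => decide (t ≤ p ∧ p ≤ -1)) : Int) +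
          (((PySem.Set.add occ e).filter (fun z => decide (t ≤ z ∧ z ≤ -1))).length : Int) := by
        by_cases hx : t ≤ x ∧ x ≤ -1
        · -- x is one of the counted requests; it fills a fresh slot e ∈ [t,-1]
          have hee : e ≤ -1 := by
            by_contra hbig
            push_neg at hbig
            exact hsafe ⟨hx.2, fun r hr1 hr2 => hE3 r hr1 (by omega)⟩
          have hte : t ≤ e := by omega
          have hadd : PySem.Set.add occ e = occ ++ [e] := PySem.Set.add_of_not_mem hE2
          have hflen : ((occ ++ [e]).filter (fun z => decide (t ≤ z ∧ z ≤ -1))).length =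
              (occ.filter (fun z => decide (t ≤ z ∧ z ≤ -1))).length + 1 := by
            rw [List.filter_append]
            have hone : ([e].filter (fun z => decide (t ≤ z ∧ z ≤ -1))) = [e] := by
              simp only [List.filter_cons, List.filter_nil, decide_eq_true_eq]
              rw [if_pos ⟨hte, hee⟩]
            rw [hone]
            simp
          have hccons : ((x :: rest).countP (fun p => decide (t ≤ p ∧ p ≤ -1))) =
              (rest.countP (fun p => decide (t ≤ p ∧ p ≤ -1))) + 1 := by
            rw [List.countP_cons]
            simp only [decide_eq_true_eq]
            rw [if_pos hx]
          rw [hadd, hflen]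
          rw [hccons] at hcnt
          push_cast at hcnt ⊢
          omega
        · -- x is not counted; the slots in [t,-1] never empty
          have hccons : ((x :: rest).countP (fun p => decide (t ≤ p ∧ p ≤ -1))) =
              (rest.countP (fun p => decide (t ≤ p ∧ p ≤ -1))) := by
            rw [List.countP_cons]
            simp only [decide_eq_true_eq]
            rw [if_neg hx]
            omega
          have hmono : (occ.filter (fun z => decide (t ≤ z ∧ z ≤ -1))).length ≤
              ((PySem.Set.add occ e).filter (fun z => decide (t ≤ z ∧ z ≤ -1))).length := by
            rw [PySem.Set.add_eq_ite]
            split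
            · exact le_refl _
            · rw [List.filter_append]
              simp
          rw [hccons] at hcnt
          push_cast at hcnt ⊢
          omega
      rw [List.foldl_cons, List.foldl_cons, hstepb, hsplit]
      exact ih (ans ++ [e]) (stepA (ans, room) x).2 (PySem.Set.add occ e) t hAinv ht hcnt'

-- ===== VERDICT =====
theorem solution_spec : Claim_unchanged_solution := by
  intro k rn _ hD
  show solution k rn = solution_alt k rn
  unfold solution solution_alt
  refine loop_eq rn [] [] PySem.Dict.empty [] ?_ ?_ ?_
  · exact invab_empty
  · intro t y hty hblock hleft
    exact absurd (hblock t (le_refl t) hty) (List.not_mem_nil)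
  · simpa [D_solution] using hD

theorem solution_changed : Claim_changed_solution := by
  unfold Claim_changed_solution; decide

theorem solution_tight : Claim_exact_solution := by
  intro k rn _ hD
  obtain ⟨t, htmem, ht1, ht2⟩ := hD
  unfold solution solution_alt
  refine tight_main rn [] PySem.Dict.empty [] t invab_empty ht1 ?_
  simpa using ht2
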